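-- pv_equiv track=rewrite | github.com/ocibar007-eng/Radon | scripts/build_md_reference_bundle.py | sanitize_anchor
-- ===== SOURCE A (Python) =====
-- def sanitize_anchor(text: str) -> str:
--     # Simple, stable-ish anchor for internal navigation.
--     t = text.lower()
--     keep = []
--     for ch in t:
--         if ch.isalnum():
--             keep.append(ch)
--         elif ch in ("/", ".", "_", "-", " "):
--             keep.append("-")
--         else:
--             keep.append("-")
--     # Collapse dashes.
--     out = []
--     prev_dash = False
--     for ch in keep:
--         if ch == "-":
--             if not prev_dash:
--                 out.append("-")
--             prev_dash = True
--         else: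
--             out.append(ch)
--             prev_dash = False
--     return "".join(out).strip("-")[:80] or "file"
-- ===== SOURCE B (Python) =====
-- def sanitize_anchor(text: str) -> str:
--     # Lowercase, blank out non-alphanumerics, let str.split() produce the
--     # maximal alnum runs, and join them with single dashes.
--     tokens = "".join(ch if ch.isalnum() else " " for ch in text.lower()).split()
--     return "-".join(tokens)[:80] or "file"
-- ===== Notes on version B (the rewrite author's own statement) =====
-- stated objective: idiomatic
-- what changed: A masks every character to itself or a dash and then runs a second stateful pass to collapse dash runs plus a final two-sided dash strip; B masks non-alphanumerics to spaces and lets str.split() produce the maximal alphanumeric runs directly, joining them with single dashes (no collapse or strip pass).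
import Mathlib
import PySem

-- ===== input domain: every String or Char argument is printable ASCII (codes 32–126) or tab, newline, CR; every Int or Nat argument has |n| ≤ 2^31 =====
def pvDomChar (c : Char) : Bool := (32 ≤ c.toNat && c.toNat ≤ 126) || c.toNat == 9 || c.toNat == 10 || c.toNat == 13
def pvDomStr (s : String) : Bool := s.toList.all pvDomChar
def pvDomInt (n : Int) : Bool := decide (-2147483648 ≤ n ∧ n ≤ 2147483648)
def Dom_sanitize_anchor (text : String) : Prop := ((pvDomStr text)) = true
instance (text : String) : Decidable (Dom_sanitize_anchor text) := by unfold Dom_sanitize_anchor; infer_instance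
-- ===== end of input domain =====

-- B replaces A's two hand-written passes (char-by-char masking, then dash collapsing + strip)
-- by masking to spaces and letting str.split deliver the alnum runs, joined with '-' (idiomatic).

-- ===== PORT A =====
def sanitize_anchor (text : String) : String :=
  let t := PySem.Chars.lower text.toList
  let keep := t.map (fun ch =>
    if PySem.Chars.isalnum ch then ch
    else if ch ∈ ['/', '.', '_', '-', ' '] then '-'
    else '-')
  let st := keep.foldl (fun (st : List Char × Bool) ch =>
    if ch = '-' then (if st.2 then st.1 else st.1 ++ ['-'], true)
    else (st.1 ++ [ch], false)) ([], false)
  let r := PySem.List.slice (PySem.Chars.stripChars st.1 ['-']) none (some 80)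
  if r = [] then "file" else String.ofList r

-- ===== PORT B =====
def sanitize_anchor_alt (text : String) : String :=
  let tokens := PySem.Chars.split₀
    ((PySem.Chars.lower text.toList).map (fun ch => if PySem.Chars.isalnum ch then ch else ' '))
  let r := PySem.List.slice (PySem.Chars.join ['-'] tokens) none (some 80)
  if r = [] then "file" else String.ofList r

-- ===== PRECONDITION & SPEC =====
def Spec_sanitize_anchor (text : String) (out : String) : Prop := out = sanitize_anchor_alt text
instance (text : String) (out : String) : Decidable (Spec_sanitize_anchor text out) := by unfold Spec_sanitize_anchor; infer_instance

-- ===== CLAIM (what is proved, stated in full; the proofs are below) =====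
def Claim_equal_sanitize_anchor : Prop := ∀ (text : String), Dom_sanitize_anchor text → Spec_sanitize_anchor text (sanitize_anchor text)

-- ===== LEMMAS AND PROOFS =====

-- A's collapse loop, as structural recursion over the ORIGINAL (lowered) characters.
def colRec : List Char → Bool → List Char
  | [], _ => []
  | c :: cs, prev =>
      if PySem.Chars.isalnum c then c :: colRec cs false
      else if prev then colRec cs true else '-' :: colRec cs true

-- The maximal alnum runs (cur = current run, reversed).
def wordsRec : List Char → List Char → List (List Char)
  | [], cur => if cur = [] then [] else [cur.reverse]
  | c :: cs, cur =>
      if PySem.Chars.isalnum c then wordsRec cs (c :: cur)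
      else if cur = [] then wordsRec cs [] else cur.reverse :: wordsRec cs []

def dashQ (c : Char) : Bool := ['-'].contains c

def rstripD (x : List Char) : List Char := (List.dropWhile dashQ x.reverse).reverse

theorem alnum_range (c : Char) (h : PySem.Chars.isalnum c = true) :
    (48 ≤ c.toNat ∧ c.toNat ≤ 57) ∨ (65 ≤ c.toNat ∧ c.toNat ≤ 90) ∨ (97 ≤ c.toNat ∧ c.toNat ≤ 122) := by
  simp only [PySem.Chars.isalnum, PySem.Chars.isalpha, PySem.Chars.isdigit, PySem.Chars.isupper,
    PySem.Chars.islower, Bool.or_eq_true, Bool.and_eq_true, decide_eq_true_eq,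
    Char.le_def, UInt32.le_iff_toNat_le, show ('A'.val.toNat = 65) from rfl,
    show ('Z'.val.toNat = 90) from rfl, show ('a'.val.toNat = 97) from rfl,
    show ('z'.val.toNat = 122) from rfl, show ('0'.val.toNat = 48) from rfl,
    show ('9'.val.toNat = 57) from rfl] at h
  simp only [Char.toNat]
  omega

theorem alnum_ne_dash (c : Char) (h : PySem.Chars.isalnum c = true) : c ≠ '-' := by
  intro hc; subst hc; have := alnum_range _ h; simp [Char.toNat] at this

theorem alnum_not_space (c : Char) (h : PySem.Chars.isalnum c = true) :
    PySem.Chars.isspace c = false := by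
  have h' := alnum_range _ h
  simp only [PySem.Chars.isspace, Bool.or_eq_false_iff, Bool.and_eq_false_iff,
    decide_eq_false_iff_not]
  simp only [Char.toNat] at h' ⊢
  omega

theorem alnum_not_dashQ (c : Char) (h : PySem.Chars.isalnum c = true) : dashQ c = false := by
  simp [dashQ]; exact fun hc => alnum_ne_dash c h hc

-- A's foldl collapse equals colRec (on the original characters, through the mask).
theorem A_loop (L : List Char) (out : List Char) (prev : Bool) :
    ((L.map (fun ch => if PySem.Chars.isalnum ch then ch
        else if ch ∈ ['/', '.', '_', '-', ' '] then '-' else '-')).foldl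
      (fun (st : List Char × Bool) ch =>
        if ch = '-' then (if st.2 then st.1 else st.1 ++ ['-'], true)
        else (st.1 ++ [ch], false)) (out, prev)).1 = out ++ colRec L prev := by
  induction L generalizing out prev with
  | nil => simp [colRec]
  | cons c cs ih =>
    simp only [List.map_cons, List.foldl_cons]
    by_cases hc : PySem.Chars.isalnum c = true
    · rw [show (if PySem.Chars.isalnum c = true then c
          else if c ∈ ['/', '.', '_', '-', ' '] then '-' else '-') = c by simp [hc]]
      rw [if_neg (alnum_ne_dash c hc)]
      simpa [colRec, hc] using ih (out ++ [c]) false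
    · have hm : (if PySem.Chars.isalnum c = true then c
          else if c ∈ ['/', '.', '_', '-', ' '] then '-' else '-') = '-' := by
        simp only [hc, Bool.false_eq_true, if_false]; split <;> rfl
      rw [hm, if_pos rfl]
      cases prev with
      | true => simpa [colRec, hc] using ih out true
      | false => simpa [colRec, hc] using ih (out ++ ['-']) true

-- B's split₀.go equals wordsRec (on the original characters, through the mask).
theorem B_go' (L : List Char) (cur : List Char) (acc : List (List Char)) :
    PySem.Chars.split₀.go
      (L.map (fun ch => if PySem.Chars.isalnum ch then ch else ' ')) cur acc
      = acc.reverse ++ wordsRec L cur := by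
  induction L generalizing cur acc with
  | nil =>
    simp only [List.map_nil, PySem.Chars.split₀.go, wordsRec]
    by_cases hcur : cur = []
    · simp [hcur]
    · simp [hcur, List.isEmpty_iff]
  | cons c cs ih =>
    by_cases hc : PySem.Chars.isalnum c = true
    · simp only [List.map_cons, hc, if_true, PySem.Chars.split₀.go,
        alnum_not_space c hc, Bool.false_eq_true, if_false, wordsRec]
      exact ih (c :: cur) acc
    · simp only [List.map_cons, hc, Bool.false_eq_true, if_false, PySem.Chars.split₀.go,
        show PySem.Chars.isspace ' ' = true from rfl, if_true, wordsRec]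
      by_cases hcur : cur = []
      · simp [hcur, ih]
      · simp only [List.isEmpty_iff, hcur, if_false, ih]
        simp

-- every produced word is nonempty
theorem words_ne_nil (L : List Char) (cur : List Char) :
    ∀ w ∈ wordsRec L cur, w ≠ [] := by
  induction L generalizing cur with
  | nil =>
    intro w hw
    by_cases hcur : cur = []
    · simp [wordsRec, hcur] at hw
    · simp [wordsRec, hcur] at hw
      subst hw; simpa using hcur
  | cons c cs ih =>
    intro w hw
    by_cases hc : PySem.Chars.isalnum c = true
    · simp only [wordsRec, hc, if_true] at hw; exact ih _ w hw
    · simp only [wordsRec, hc, Bool.false_eq_true, if_false] at hw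
      by_cases hcur : cur = []
      · rw [if_pos hcur] at hw; exact ih _ w hw
      · rw [if_neg hcur] at hw
        rcases List.mem_cons.1 hw with hw | hw
        · subst hw; simpa using hcur
        · exact ih _ w hw

theorem join_ne_nil (w : List Char) (ws : List (List Char)) (h : w ≠ []) :
    PySem.Chars.join ['-'] (w :: ws) ≠ [] := by
  cases ws with
  | nil => simpa [PySem.Chars.join_singleton] using h
  | cons b rest =>
    rw [PySem.Chars.join_cons_cons]
    intro hcon
    have := congrArg List.length hcon
    simp at this

theorem rstripD_nil_iff (y : List Char) :
    rstripD y = [] ↔ List.dropWhile dashQ y.reverse = [] := by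
  unfold rstripD; constructor <;> intro h <;> simpa using congrArg List.reverse h

theorem rstripD_append_nil (a y : List Char) (h : rstripD y = []) :
    rstripD (a ++ y) = rstripD a := by
  unfold rstripD
  rw [List.reverse_append, List.dropWhile_append]
  rw [(rstripD_nil_iff y).1 h]
  simp

theorem rstripD_append_ne (a y : List Char) (h : rstripD y ≠ []) :
    rstripD (a ++ y) = a ++ rstripD y := by
  have h' : List.dropWhile dashQ y.reverse ≠ [] := fun hc => h ((rstripD_nil_iff y).2 hc)
  unfold rstripD
  rw [List.reverse_append, List.dropWhile_append]
  rw [if_neg (by simpa [List.isEmpty_iff] using h')]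
  simp

theorem rstripD_dash_nil (y : List Char) (h : rstripD y = []) : rstripD ('-' :: y) = [] := by
  have := rstripD_append_nil ['-'] y h
  simpa [rstripD, dashQ] using this

theorem rstripD_alnum_rev (cur : List Char) (hcur : cur ≠ [])
    (hal : ∀ c ∈ cur, PySem.Chars.isalnum c = true) : rstripD cur.reverse = cur.reverse := by
  unfold rstripD
  rw [List.reverse_reverse]
  cases cur with
  | nil => simp
  | cons c rest =>
    rw [List.dropWhile_cons_of_neg (by simp [alnum_not_dashQ c (hal c (by simp))])]

-- the core correspondence: A's collapsed-and-right-stripped output is the dash-join of the runs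
theorem core (L : List Char) :
    (∀ cur, cur ≠ [] → (∀ c ∈ cur, PySem.Chars.isalnum c = true) →
        rstripD (cur.reverse ++ colRec L false) = PySem.Chars.join ['-'] (wordsRec L cur))
    ∧ rstripD (colRec L true) = PySem.Chars.join ['-'] (wordsRec L []) := by
  induction L with
  | nil =>
    constructor
    · intro cur hcur hal
      simp only [colRec, List.append_nil, wordsRec, if_neg hcur, PySem.Chars.join_singleton]
      exact rstripD_alnum_rev cur hcur hal
    · simp [colRec, wordsRec, rstripD, PySem.Chars.join_nil]
  | cons c cs ih =>
    obtain ⟨ih1, ih2⟩ := ih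
    have main : ∀ cur, cur ≠ [] → (∀ x ∈ cur, PySem.Chars.isalnum x = true) →
        rstripD (cur.reverse ++ colRec (c :: cs) false) =
          PySem.Chars.join ['-'] (wordsRec (c :: cs) cur) := by
      intro cur hcur hal
      by_cases hc : PySem.Chars.isalnum c = true
      · simp only [colRec, hc, if_true, wordsRec]
        have := ih1 (c :: cur) (by simp)
          (fun x hx => by rcases List.mem_cons.1 hx with h | h
                          exacts [by rw [h]; exact hc, hal x h])
        rw [← this, List.reverse_cons, List.append_assoc]
        rfl
      · simp only [colRec, hc, Bool.false_eq_true, if_false, wordsRec, if_neg hcur]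
        cases hws : wordsRec cs [] with
        | nil =>
          have hnil : rstripD (colRec cs true) = [] := by
            rw [ih2, hws, PySem.Chars.join_nil]
          rw [rstripD_append_nil cur.reverse _ (rstripD_dash_nil _ hnil)]
          rw [rstripD_alnum_rev cur hcur hal, PySem.Chars.join_singleton]
        | cons w ws =>
          have hwne : w ≠ [] := words_ne_nil cs [] w (by rw [hws]; simp)
          have hne : rstripD (colRec cs true) ≠ [] := by
            rw [ih2, hws]; exact join_ne_nil w ws hwne
          have hdash : rstripD ('-' :: colRec cs true) = '-' :: rstripD (colRec cs true) := by
            have := rstripD_append_ne ['-'] (colRec cs true) hne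
            simpa using this
          rw [rstripD_append_ne cur.reverse _ (by rw [hdash]; simp), hdash, ih2, hws,
            PySem.Chars.join_cons_cons]
          simp
    refine ⟨main, ?_⟩
    by_cases hc : PySem.Chars.isalnum c = true
    · simp only [colRec, hc, if_true, wordsRec]
      have h1 := ih1 [c] (by simp) (by simpa using hc)
      simpa using h1
    · simp only [colRec, hc, Bool.false_eq_true, if_false, if_true, wordsRec]
      exact ih2

theorem colRec_true_nodash (L : List Char) :
    List.dropWhile dashQ (colRec L true) = colRec L true := by
  induction L with
  | nil => simp [colRec]
  | cons c cs ih =>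
    by_cases hc : PySem.Chars.isalnum c = true
    · simp only [colRec, hc, if_true]
      rw [List.dropWhile_cons_of_neg (by simp [alnum_not_dashQ c hc])]
    · simp only [colRec, hc, Bool.false_eq_true, if_false, if_true]
      exact ih

theorem false_to_true (L : List Char) :
    List.dropWhile dashQ (colRec L false) = colRec L true := by
  cases L with
  | nil => simp [colRec]
  | cons c cs =>
    by_cases hc : PySem.Chars.isalnum c = true
    · simp only [colRec, hc, if_true]
      rw [List.dropWhile_cons_of_neg (by simp [alnum_not_dashQ c hc])]
    · simp only [colRec, hc, Bool.false_eq_true, if_false]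
      rw [List.dropWhile_cons_of_pos (by simp [dashQ])]
      exact colRec_true_nodash cs

theorem dashQ_eq : dashQ = fun c : Char => ['-'].contains c := rfl

theorem stripChars_eq (s : List Char) :
    PySem.Chars.stripChars s ['-'] = rstripD (List.dropWhile dashQ s) := by
  simp only [PySem.Chars.stripChars, rstripD, dashQ_eq]

-- ===== VERDICT (by name: the statement is the Claim_ definition above) =====
theorem sanitize_anchor_spec : Claim_equal_sanitize_anchor := by
  intro text _
  show sanitize_anchor text = sanitize_anchor_alt text
  have hA := A_loop (PySem.Chars.lower text.toList) [] false
  simp only [List.nil_append] at hA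
  simp only [sanitize_anchor, sanitize_anchor_alt]
  rw [hA, stripChars_eq, false_to_true, (core (PySem.Chars.lower text.toList)).2]
  simp only [PySem.Chars.split₀]
  rw [B_go' (PySem.Chars.lower text.toList) [] []]
  simp
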